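-- pv_equiv track=rewrite | github.com/pypi-data/pypi-mirror-404 | packages/honeyhive-bundled/honeyhive_bundled-1.0.1.tar.gz/honeyhive_bundled-1.0.1/.praxis-os/ouroboros/subsystems/workflow/parsers/shared/validation.py | validate_phase_sequence
-- ===== SOURCE A (Python) =====
-- from typing import List, Optional, Tuple
--
-- def validate_phase_sequence(phase_numbers: List[int]) -> Tuple[bool, Optional[str]]:
--     """
--     Validate that phases are sequential with no gaps or duplicates.
--
--     Args:
--         phase_numbers: List of phase numbers
--
--     Returns:
--         Tuple of (is_valid, error_message)
--
--     Examples: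
--         >>> validate_phase_sequence([0, 1, 2, 3])
--         (True, None)
--         >>> validate_phase_sequence([1, 2, 3, 4])
--         (True, None)
--         >>> validate_phase_sequence([1, 3, 4])
--         (False, "Phase sequence has gaps: missing phase 2")
--         >>> validate_phase_sequence([0, 0, 1, 2])
--         (False, "Phase sequence has duplicates: [0]")
--     """
--     if not phase_numbers:
--         return False, "No phases provided"
--
--     # Check for duplicates
--     if len(phase_numbers) != len(set(phase_numbers)):
--         from collections import Counter
--         counts = Counter(phase_numbers)
--         duplicates = [num for num, count in counts.items() if count > 1]
--         return (
--             False,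
--             f"Phase sequence has duplicates: {sorted(duplicates)}",
--         )
--
--     sorted_phases = sorted(phase_numbers)
--     min_phase = sorted_phases[0]
--     max_phase = sorted_phases[-1]
--
--     # Check that phases start at 0 or 1
--     if min_phase not in (0, 1):
--         return (
--             False,
--             f"Phases must start at 0 or 1, found {min_phase}",
--         )
--
--     # Check for gaps
--     expected = list(range(min_phase, max_phase + 1))
--     if sorted_phases != expected:
--         missing = set(expected) - set(sorted_phases)
--         return (
--             False,
--             f"Phase sequence has gaps: missing phases {sorted(missing)}",
--         )
--
--     return True, None
-- ===== SOURCE B (Python) =====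
-- from typing import List, Optional, Tuple
--
-- def validate_phase_sequence(phase_numbers: List[int]) -> Tuple[bool, Optional[str]]:
--     """Single pass (no sort): track seen/duplicate sets and min/max; a gap-free
--     duplicate-free run is exactly len == max - min + 1."""
--     if not phase_numbers:
--         return False, "No phases provided"
--     seen = set()
--     dups = set()
--     lo = hi = phase_numbers[0]
--     for n in phase_numbers:
--         if n in seen:
--             dups.add(n)
--         else:
--             seen.add(n)
--         if n < lo:
--             lo = n
--         if hi < n:
--             hi = n
--     if dups:
--         return False, f"Phase sequence has duplicates: {sorted(dups)}"
--     if lo not in (0, 1):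
--         return False, f"Phases must start at 0 or 1, found {lo}"
--     if len(seen) != hi - lo + 1:
--         missing = [v for v in range(lo, hi + 1) if v not in seen]
--         return False, f"Phase sequence has gaps: missing phases {missing}"
--     return True, None
-- ===== Notes on version B (the rewrite author's own statement) =====
-- stated objective: alternative
-- what changed: Replaces A's sort + Counter + materialised range(min,max+1) list comparison by a single pass that maintains a seen-set, a duplicate-set and the running min/max, then checks len(seen) == max - min + 1 arithmetically; sorting is only done on the (small) duplicate set for the error message.
import Mathlib
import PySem

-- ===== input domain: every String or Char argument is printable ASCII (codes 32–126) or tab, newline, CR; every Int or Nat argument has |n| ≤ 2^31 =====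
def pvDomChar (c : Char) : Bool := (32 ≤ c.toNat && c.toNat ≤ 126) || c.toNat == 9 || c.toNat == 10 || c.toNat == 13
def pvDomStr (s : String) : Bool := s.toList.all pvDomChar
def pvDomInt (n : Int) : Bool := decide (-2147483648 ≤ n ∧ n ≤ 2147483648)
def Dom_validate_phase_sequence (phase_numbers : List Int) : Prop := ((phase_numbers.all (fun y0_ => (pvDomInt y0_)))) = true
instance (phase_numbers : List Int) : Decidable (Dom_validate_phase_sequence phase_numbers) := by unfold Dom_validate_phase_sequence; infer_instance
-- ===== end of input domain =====

-- B replaces A's sort + Counter + range-list comparison by one fold keeping (seen, dups, min, max)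
-- and the arithmetic check len == max - min + 1 (objective: alternative, O(n) single pass vs sort).

-- Python's str() of a list of ints, "[a, b]" — the f-string formatting both Pythons share
def pyIntListRepr (xs : List Int) : String :=
  "[" ++ String.intercalate ", " (xs.map PySem.Int.toStr) ++ "]"

-- ===== PORT A =====
def validate_phase_sequence (phase_numbers : List Int) : Bool × Option String :=
  if phase_numbers = [] then (false, some "No phases provided")
  else if phase_numbers.length ≠ (PySem.Set.ofList phase_numbers).length then
    let counts := PySem.Dict.counter phase_numbers
    let duplicates := (counts.items.filter (fun p => 1 < p.2)).map Prod.fst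
    (false, some ("Phase sequence has duplicates: " ++ pyIntListRepr (PySem.List.sorted duplicates id)))
  else
    let sorted_phases := PySem.List.sorted phase_numbers id
    -- sorted_phases[0] / sorted_phases[-1]: the list is nonempty here, so pyGet? is `some`
    let min_phase := (PySem.List.pyGet? sorted_phases 0).getD 0
    let max_phase := (PySem.List.pyGet? sorted_phases (-1)).getD 0
    if ¬ (min_phase = 0 ∨ min_phase = 1) then
      (false, some ("Phases must start at 0 or 1, found " ++ PySem.Int.toStr min_phase))
    else
      let expected := PySem.List.pyRange min_phase (max_phase + 1)
      if sorted_phases ≠ expected then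
        let missing := (PySem.Set.ofList expected).diff (PySem.Set.ofList sorted_phases)
        (false, some ("Phase sequence has gaps: missing phases " ++ pyIntListRepr (PySem.List.sorted missing id)))
      else (true, none)

-- ===== PORT B =====
-- the body of Source B's single for-loop: update (seen, dups, lo, hi) with n
def vpsStep (st : PySem.Set Int × PySem.Set Int × Int × Int) (n : Int) :
    PySem.Set Int × PySem.Set Int × Int × Int :=
  let p := if st.1.contains n then (st.1, st.2.1.add n) else (st.1.add n, st.2.1)
  (p.1, p.2, if n < st.2.2.1 then n else st.2.2.1, if st.2.2.2 < n then n else st.2.2.2)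

def validate_phase_sequence_alt (phase_numbers : List Int) : Bool × Option String :=
  match phase_numbers with
  | [] => (false, some "No phases provided")
  | x :: _ =>
    let st := phase_numbers.foldl vpsStep (([] : PySem.Set Int), ([] : PySem.Set Int), x, x)
    let seen := st.1
    let dups := st.2.1
    let lo := st.2.2.1
    let hi := st.2.2.2
    if dups ≠ [] then
      (false, some ("Phase sequence has duplicates: " ++ pyIntListRepr (PySem.List.sorted dups id)))
    else if ¬ (lo = 0 ∨ lo = 1) then
      (false, some ("Phases must start at 0 or 1, found " ++ PySem.Int.toStr lo))
    else if (seen.length : Int) ≠ hi - lo + 1 then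
      let missing := (PySem.List.pyRange lo (hi + 1)).filter (fun v => !(seen.contains v))
      (false, some ("Phase sequence has gaps: missing phases " ++ pyIntListRepr missing))
    else (true, none)

-- ===== PRECONDITION & SPEC =====
def Spec_validate_phase_sequence (phase_numbers : List Int) (out : Bool × Option String) : Prop := out = validate_phase_sequence_alt phase_numbers
instance (phase_numbers : List Int) (out : Bool × Option String) : Decidable (Spec_validate_phase_sequence phase_numbers out) := by unfold Spec_validate_phase_sequence; infer_instance

-- ===== CLAIM (what is proved, stated in full; the proofs are below) =====
def Claim_equal_validate_phase_sequence : Prop := ∀ (phase_numbers : List Int), Dom_validate_phase_sequence phase_numbers → Spec_validate_phase_sequence phase_numbers (validate_phase_sequence phase_numbers)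

-- ===== LEMMAS AND PROOFS =====

lemma lenOfList_le (xs : List Int) : (PySem.Set.ofList xs).length ≤ xs.length := by
  induction xs with
  | nil => simp [PySem.Set.ofList_nil]
  | cons x xs ih =>
    rw [PySem.Set.ofList_cons]
    have h2 : ((PySem.Set.ofList xs).discard x).length ≤ (PySem.Set.ofList xs).length := by
      rw [PySem.Set.discard.eq_1]; exact List.length_filter_le _ _
    have h3 := ih
    simp only [List.length_cons]
    omega

lemma lenOfList_lt_of_not_nodup (xs : List Int) (h : ¬ xs.Nodup) :
    (PySem.Set.ofList xs).length < xs.length := by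
  induction xs with
  | nil => simp at h
  | cons x xs ih =>
    rw [PySem.Set.ofList_cons]
    by_cases hx : x ∈ xs
    · have hlt : ((PySem.Set.ofList xs).discard x).length < (PySem.Set.ofList xs).length := by
        rw [PySem.Set.discard.eq_1]
        rw [List.length_filter_lt_length_iff_exists]
        exact ⟨x, (PySem.Set.mem_ofList xs x).2 hx, by simp⟩
      have := lenOfList_le xs
      simp only [List.length_cons]
      omega
    · have hnx : ¬ xs.Nodup := by
        intro hn; exact h (List.nodup_cons.2 ⟨hx, hn⟩)
      have := ih hnx
      have hle : ((PySem.Set.ofList xs).discard x).length ≤ (PySem.Set.ofList xs).length := by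
        rw [PySem.Set.discard.eq_1]; exact List.length_filter_le _ _
      simp only [List.length_cons]
      omega

lemma lenOfList_eq_iff (xs : List Int) :
    ((PySem.Set.ofList xs).length = xs.length) ↔ xs.Nodup := by
  constructor
  · intro h
    by_contra hn
    exact absurd h (by have := lenOfList_lt_of_not_nodup xs hn; omega)
  · intro h; rw [PySem.Set.ofList_eq_self_of_nodup xs h]

-- sorted l id equals any strictly increasing list with the same elements (l nodup)
lemma sorted_eq_target (l ys : List Int) (hys : List.Pairwise (· < ·) ys)
    (hl : l.Nodup) (hmem : ∀ y, y ∈ l ↔ y ∈ ys) : PySem.List.sorted l id = ys := by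
  have hysnd : ys.Nodup := hys.imp (fun h => ne_of_lt h)
  have hperm : ys.Perm l :=
    ((List.perm_ext_iff_of_nodup hysnd hl).2 (fun a => (hmem a).symm))
  exact PySem.List.sorted_eq_of_perm_of_pairwise_lt l ys id hperm (by simpa using hys)

lemma sorted_eq_sorted_of_nodup (l1 l2 : List Int) (h1 : l1.Nodup) (h2 : l2.Nodup)
    (h : ∀ y, y ∈ l1 ↔ y ∈ l2) : PySem.List.sorted l1 id = PySem.List.sorted l2 id := by
  have hperm : (PySem.List.sorted l2 id).Perm l2 := PySem.List.sorted_perm l2 id false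
  have hnd : (PySem.List.sorted l2 id).Nodup := (hperm.nodup_iff).2 h2
  have hle : List.Pairwise (fun a b => (a : Int) ≤ b) (PySem.List.sorted l2 id) := by
    simpa using PySem.List.sorted_pairwise l2 (id : Int → Int)
  have hlt : List.Pairwise (· < ·) (PySem.List.sorted l2 id) :=
    (hle.and hnd).imp (fun h => lt_of_le_of_ne h.1 h.2)
  exact sorted_eq_target l1 _ hlt h1
    (fun y => (h y).trans (hperm.mem_iff).symm)

-- A's duplicates list = first-occurrence-ordered keys with count > 1
lemma counter_dups_eq (xs : List Int) :
    (((PySem.Dict.counter xs).items.filter (fun p => 1 < p.2)).map Prod.fst) =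
      (PySem.Set.ofList xs).filter (fun k => 1 < xs.count k) := by
  have hkeys : (PySem.Dict.counter xs).keys = PySem.Set.ofList xs := PySem.Dict.keys_counter xs
  have hknd : (PySem.Dict.counter xs).keys.Nodup := by
    rw [hkeys]; exact PySem.Set.nodup_ofList xs
  have hitems := PySem.Dict.items_eq_map_keys (PySem.Dict.counter xs) hknd (0 : Int)
  have hgetD : ∀ k, (PySem.Dict.counter xs).getD k 0 = (xs.count k : Int) := by
    intro k
    rw [PySem.Dict.counter.eq_1, PySem.Dict.getD_foldl_modify_add_one]
    have : (PySem.Dict.empty : PySem.Dict Int Int).getD k 0 = 0 := by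
      apply PySem.Dict.getD_of_get?_eq_none
      rw [PySem.Dict.get?_eq_none_iff_not_mem_keys, PySem.Dict.keys_empty]
      simp
    rw [this]; simp
  rw [hitems, hkeys, List.filter_map, List.map_map]
  simp only [Function.comp_def, hgetD]
  have hid : (fun x : Int => x) = id := rfl
  rw [hid, List.map_id]
  apply List.filter_congr
  intro k _
  rw [decide_eq_decide]
  exact ⟨fun h => by exact_mod_cast h, fun h => by exact_mod_cast h⟩

-- facts about B's loop, one component at a time
lemma vpsStep_of_mem (seen dups : PySem.Set Int) (lo hi n : Int) (hn : n ∈ seen) :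
    vpsStep (seen, dups, lo, hi) n =
      (seen, dups.add n, if n < lo then n else lo, if hi < n then n else hi) := by
  simp [vpsStep, hn]

lemma vpsStep_of_not_mem (seen dups : PySem.Set Int) (lo hi n : Int) (hn : n ∉ seen) :
    vpsStep (seen, dups, lo, hi) n =
      (seen.add n, dups, if n < lo then n else lo, if hi < n then n else hi) := by
  simp [vpsStep, hn]

lemma loopSeen (xs : List Int) : ∀ (seen dups : PySem.Set Int) (lo hi : Int),
    (xs.foldl vpsStep (seen, dups, lo, hi)).1 = seen.update xs := by
  induction xs with
  | nil => intro seen dups lo hi; simp [PySem.Set.update_eq_foldl]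
  | cons n xs ih =>
    intro seen dups lo hi
    rw [List.foldl_cons, PySem.Set.update_eq_foldl, List.foldl_cons,
      ← PySem.Set.update_eq_foldl]
    by_cases hn : n ∈ seen
    · rw [vpsStep_of_mem seen dups lo hi n hn, ih, PySem.Set.add_of_mem hn]
    · rw [vpsStep_of_not_mem seen dups lo hi n hn, ih]

lemma loopDupsNodup (xs : List Int) : ∀ (seen dups : PySem.Set Int) (lo hi : Int),
    dups.Nodup → (xs.foldl vpsStep (seen, dups, lo, hi)).2.1.Nodup := by
  induction xs with
  | nil => intro seen dups lo hi hd; simpa using hd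
  | cons n xs ih =>
    intro seen dups lo hi hd
    rw [List.foldl_cons]
    by_cases hn : n ∈ seen
    · rw [vpsStep_of_mem seen dups lo hi n hn]
      exact ih _ _ _ _ (PySem.Set.nodup_add dups n hd)
    · rw [vpsStep_of_not_mem seen dups lo hi n hn]
      exact ih _ _ _ _ hd

lemma loopDupsMem (xs : List Int) : ∀ (seen dups : PySem.Set Int) (lo hi y : Int),
    (y ∈ (xs.foldl vpsStep (seen, dups, lo, hi)).2.1 ↔
      y ∈ dups ∨ (y ∈ seen ∧ y ∈ xs) ∨ 2 ≤ xs.count y) := by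
  induction xs with
  | nil => intro seen dups lo hi y; simp
  | cons n xs ih =>
    intro seen dups lo hi y
    rw [List.foldl_cons]
    by_cases hn : n ∈ seen
    · rw [vpsStep_of_mem seen dups lo hi n hn, ih]
      by_cases hyn : y = n
      · subst hyn
        rw [List.count_cons_self]
        simp only [PySem.Set.mem_add, List.mem_cons]
        tauto
      · rw [List.count_cons_of_ne (Ne.symm hyn)]
        have hmd : y ∈ dups.add n ↔ y ∈ dups := by
          rw [PySem.Set.mem_add]; simp [hyn]
        rw [hmd]
        simp only [List.mem_cons]
        tauto
    · rw [vpsStep_of_not_mem seen dups lo hi n hn, ih]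
      by_cases hyn : y = n
      · subst hyn
        rw [List.count_cons_self]
        have hma : y ∈ seen.add y ↔ True := by
          rw [PySem.Set.mem_add]; simp
        have e2 : (1 ≤ xs.count y) ↔ y ∈ xs := by
          rw [← List.count_pos_iff]; omega
        have e1 : (2 ≤ xs.count y + 1) ↔ y ∈ xs := by rw [← e2]; omega
        have e3 : 2 ≤ xs.count y → y ∈ xs := fun h => e2.1 (by omega)
        rw [hma, e1]
        simp only [List.mem_cons]
        tauto
      · rw [List.count_cons_of_ne (Ne.symm hyn)]
        have hma : y ∈ seen.add n ↔ y ∈ seen := by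
          rw [PySem.Set.mem_add]; simp [hyn]
        rw [hma]
        simp only [List.mem_cons]
        tauto

lemma loopLo (xs : List Int) : ∀ (seen dups : PySem.Set Int) (lo hi : Int),
    ((xs.foldl vpsStep (seen, dups, lo, hi)).2.2.1 = lo ∨
      (xs.foldl vpsStep (seen, dups, lo, hi)).2.2.1 ∈ xs) ∧
    (xs.foldl vpsStep (seen, dups, lo, hi)).2.2.1 ≤ lo ∧
    (∀ y ∈ xs, (xs.foldl vpsStep (seen, dups, lo, hi)).2.2.1 ≤ y) := by
  induction xs with
  | nil => intro seen dups lo hi; simp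
  | cons n xs ih =>
    intro seen dups lo hi
    rw [List.foldl_cons]
    have hproj : ∃ s1 s2, vpsStep (seen, dups, lo, hi) n =
        (s1, s2, (if n < lo then n else lo), (if hi < n then n else hi)) := by
      by_cases hn : n ∈ seen
      · exact ⟨_, _, vpsStep_of_mem seen dups lo hi n hn⟩
      · exact ⟨_, _, vpsStep_of_not_mem seen dups lo hi n hn⟩
    obtain ⟨s1, s2, hst⟩ := hproj
    set lo' := if n < lo then n else lo with hlo'
    set hi' := if hi < n then n else hi with hhi'
    have hfacts : lo' ≤ lo ∧ lo' ≤ n ∧ (lo' = lo ∨ lo' = n) := by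
      rw [hlo']; split <;> omega
    rw [hst]
    obtain ⟨ha, hb, hc⟩ := ih s1 s2 lo' hi'
    refine ⟨?_, ?_, ?_⟩
    · rcases ha with h | h
      · rw [h]
        rcases hfacts.2.2 with h' | h'
        · exact Or.inl h'
        · rw [h']; exact Or.inr (List.mem_cons_self)
      · exact Or.inr (List.mem_cons_of_mem _ h)
    · omega
    · intro y hy
      rcases List.mem_cons.1 hy with h | h
      · subst h; omega
      · exact hc y h

lemma loopHi (xs : List Int) : ∀ (seen dups : PySem.Set Int) (lo hi : Int),
    ((xs.foldl vpsStep (seen, dups, lo, hi)).2.2.2 = hi ∨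
      (xs.foldl vpsStep (seen, dups, lo, hi)).2.2.2 ∈ xs) ∧
    hi ≤ (xs.foldl vpsStep (seen, dups, lo, hi)).2.2.2 ∧
    (∀ y ∈ xs, y ≤ (xs.foldl vpsStep (seen, dups, lo, hi)).2.2.2) := by
  induction xs with
  | nil => intro seen dups lo hi; simp
  | cons n xs ih =>
    intro seen dups lo hi
    rw [List.foldl_cons]
    have hproj : ∃ s1 s2, vpsStep (seen, dups, lo, hi) n =
        (s1, s2, (if n < lo then n else lo), (if hi < n then n else hi)) := by
      by_cases hn : n ∈ seen
      · exact ⟨_, _, vpsStep_of_mem seen dups lo hi n hn⟩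
      · exact ⟨_, _, vpsStep_of_not_mem seen dups lo hi n hn⟩
    obtain ⟨s1, s2, hst⟩ := hproj
    set lo' := if n < lo then n else lo with hlo'
    set hi' := if hi < n then n else hi with hhi'
    have hfacts : hi ≤ hi' ∧ n ≤ hi' ∧ (hi' = hi ∨ hi' = n) := by
      rw [hhi']; split <;> omega
    rw [hst]
    obtain ⟨ha, hb, hc⟩ := ih s1 s2 lo' hi'
    refine ⟨?_, ?_, ?_⟩
    · rcases ha with h | h
      · rw [h]
        rcases hfacts.2.2 with h' | h'
        · exact Or.inl h'
        · rw [h']; exact Or.inr (List.mem_cons_self)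
      · exact Or.inr (List.mem_cons_of_mem _ h)
    · omega
    · intro y hy
      rcases List.mem_cons.1 hy with h | h
      · subst h; omega
      · exact hc y h

lemma ofList_eq_update_nil (xs : List Int) :
    PySem.Set.ofList xs = PySem.Set.update ([] : PySem.Set Int) xs := rfl

lemma pyRange_pairwise_lt (a b : Int) :
    List.Pairwise (· < ·) (PySem.List.pyRange a b) := by
  rw [PySem.List.pyRange_one]
  refine List.Pairwise.map _ ?_ (List.pairwise_lt_range)
  intro x y h
  omega

lemma le_getLast_of_pairwise (l : List Int) (h : List.Pairwise (fun a b => a ≤ b) l)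
    (hne : l ≠ []) : ∀ y ∈ l, y ≤ l.getLast hne := by
  induction l with
  | nil => simp at hne
  | cons a t ih =>
    intro y hy
    cases t with
    | nil => simp at hy; simp [hy, List.getLast]
    | cons b t' =>
      rw [List.getLast_cons (by simp)]
      rcases List.mem_cons.1 hy with h' | h'
      · subst h'
        have hab : y ≤ b := (List.pairwise_cons.1 h).1 b (by simp)
        have := ih (List.pairwise_cons.1 h).2 (by simp) b (by simp)
        omega
      · exact ih (List.pairwise_cons.1 h).2 (by simp) y h'

lemma pyGet?_neg_one (l : List Int) (h : l ≠ []) :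
    PySem.List.pyGet? l (-1) = l.getLast? := by
  have hlen : 1 ≤ l.length := List.length_pos_iff.2 h
  simp only [PySem.List.pyGet?, PySem.List.pyIdx?]
  rw [if_neg (by omega), if_pos (by omega)]
  simp [List.getLast?_eq_getElem?]

lemma pyGet?_zero (a : Int) (t : List Int) :
    PySem.List.pyGet? (a :: t) 0 = some a := by
  simp [PySem.List.pyGet?, PySem.List.pyIdx?]

-- A's duplicates list, sorted, equals B's dups set, sorted
lemma dup_sorted_eq (l dups : List Int) (hdnd : dups.Nodup)
    (hdm : ∀ y, y ∈ dups ↔ 2 ≤ l.count y) :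
    PySem.List.sorted (((PySem.Dict.counter l).items.filter (fun p => 1 < p.2)).map Prod.fst) id =
      PySem.List.sorted dups id := by
  rw [counter_dups_eq]
  apply sorted_eq_sorted_of_nodup
  · exact (PySem.Set.nodup_ofList l).filter _
  · exact hdnd
  · intro y
    rw [List.mem_filter, hdm y, PySem.Set.mem_ofList]
    simp only [decide_eq_true_eq]
    constructor
    · intro h; omega
    · intro h
      have hy : y ∈ l := List.count_pos_iff.1 (by omega)
      exact ⟨hy, by omega⟩

lemma sorted_head_eq (l : List Int) (hne : l ≠ []) (m : Int) (hm : m ∈ l)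
    (hle : ∀ y ∈ l, m ≤ y) :
    (PySem.List.pyGet? (PySem.List.sorted l id) 0).getD 0 = m := by
  have hperm : (PySem.List.sorted l id).Perm l := PySem.List.sorted_perm l id false
  have hpw : List.Pairwise (fun a b => (a : Int) ≤ b) (PySem.List.sorted l id) := by
    simpa using PySem.List.sorted_pairwise l (id : Int → Int)
  rcases hs : PySem.List.sorted l id with _ | ⟨a, t⟩
  · exfalso; apply hne
    have h2 := hperm; rw [hs] at h2
    exact h2.symm.eq_nil
  · rw [pyGet?_zero, Option.getD_some]
    have ham : a ∈ l := hperm.subset (by rw [hs]; exact List.mem_cons_self)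
    have hma : m ∈ a :: t := by rw [← hs]; exact hperm.mem_iff.2 hm
    rcases List.mem_cons.1 hma with h | h
    · omega
    · have : a ≤ m := by
        rw [hs] at hpw
        exact (List.pairwise_cons.1 hpw).1 m h
      have := hle a ham
      omega

lemma sorted_last_eq (l : List Int) (hne : l ≠ []) (M : Int) (hM : M ∈ l)
    (hge : ∀ y ∈ l, y ≤ M) :
    (PySem.List.pyGet? (PySem.List.sorted l id) (-1)).getD 0 = M := by
  have hperm : (PySem.List.sorted l id).Perm l := PySem.List.sorted_perm l id false
  have hsne : PySem.List.sorted l id ≠ [] := by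
    intro h; apply hne
    have h2 := hperm; rw [h] at h2
    exact h2.symm.eq_nil
  have hpw : List.Pairwise (fun a b => (a : Int) ≤ b) (PySem.List.sorted l id) := by
    simpa using PySem.List.sorted_pairwise l (id : Int → Int)
  rw [pyGet?_neg_one _ hsne, List.getLast?_eq_some_getLast hsne, Option.getD_some]
  have hgm : (PySem.List.sorted l id).getLast hsne ∈ l :=
    hperm.subset (List.getLast_mem hsne)
  have hMs : M ∈ PySem.List.sorted l id := hperm.mem_iff.2 hM
  have h1 : M ≤ (PySem.List.sorted l id).getLast hsne :=
    le_getLast_of_pairwise _ hpw hsne M hMs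
  have h2 := hge _ hgm
  omega

lemma sorted_eq_range_iff (l : List Int) (hnd : l.Nodup) (m M : Int)
    (hmle : ∀ y ∈ l, m ≤ y) (hM : M ∈ l) (hMge : ∀ y ∈ l, y ≤ M) :
    PySem.List.sorted l id = PySem.List.pyRange m (M + 1) ↔
      (l.length : Int) = M - m + 1 := by
  have hmM : m ≤ M := hmle M hM
  have hrlen : (PySem.List.pyRange m (M + 1)).length = (M + 1 - m).toNat := by
    rw [PySem.List.pyRange_one]; simp
  constructor
  · intro h
    have := congrArg List.length h
    rw [(PySem.List.sorted_perm l id false).length_eq, hrlen] at this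
    omega
  · intro h
    have hsub : l.toFinset ⊆ Finset.Icc m M := by
      intro y hy
      rw [List.mem_toFinset] at hy
      exact Finset.mem_Icc.2 ⟨hmle y hy, hMge y hy⟩
    have hcard1 : (Finset.Icc m M).card = (M + 1 - m).toNat := Int.card_Icc m M
    have hcard2 : l.toFinset.card = l.length := List.toFinset_card_of_nodup hnd
    have heq : l.toFinset = Finset.Icc m M :=
      Finset.eq_of_subset_of_card_le hsub (by omega)
    apply sorted_eq_target l _ (pyRange_pairwise_lt m (M + 1)) hnd
    intro y
    rw [PySem.List.mem_pyRange_one, ← List.mem_toFinset, heq, Finset.mem_Icc]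
    omega

-- ===== VERDICT (by name: the statement is the Claim_ definition above) =====
theorem validate_phase_sequence_spec : Claim_equal_validate_phase_sequence := by
  intro xs _
  unfold Spec_validate_phase_sequence
  cases xs with
  | nil => rfl
  | cons x rest =>
  have hlne : x :: rest ≠ [] := by simp
  -- B's loop state and its characterisation
  have hseen : ((x :: rest).foldl vpsStep ([], [], x, x)).1 = PySem.Set.ofList (x :: rest) := by
    rw [loopSeen, ← ofList_eq_update_nil]
  have hdnd : ((x :: rest).foldl vpsStep ([], [], x, x)).2.1.Nodup :=
    loopDupsNodup (x :: rest) [] [] x x (by simp)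
  have hdm : ∀ y, y ∈ ((x :: rest).foldl vpsStep ([], [], x, x)).2.1 ↔ 2 ≤ (x :: rest).count y := by
    intro y
    have := loopDupsMem (x :: rest) [] [] x x y
    simpa using this
  obtain ⟨hmA, hmB, hmC⟩ := loopLo (x :: rest) [] [] x x
  obtain ⟨hMA, hMB, hMC⟩ := loopHi (x :: rest) [] [] x x
  have hmmem : ((x :: rest).foldl vpsStep ([], [], x, x)).2.2.1 ∈ x :: rest := by
    rcases hmA with h | h
    · rw [h]; exact List.mem_cons_self
    · exact h
  have hMmem : ((x :: rest).foldl vpsStep ([], [], x, x)).2.2.2 ∈ x :: rest := by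
    rcases hMA with h | h
    · rw [h]; exact List.mem_cons_self
    · exact h
  simp only [validate_phase_sequence, validate_phase_sequence_alt]
  rw [if_neg hlne]
  set st := (x :: rest).foldl vpsStep ([], [], x, x) with hst
  by_cases hnd : (x :: rest).Nodup
  · -- no duplicates: A skips its first branch, B's dups set is empty
    rw [if_neg (show ¬((x :: rest).length ≠ (PySem.Set.ofList (x :: rest)).length) from
      fun h => h ((lenOfList_eq_iff (x :: rest)).2 hnd).symm)]
    have hdupnil : st.2.1 = [] := by
      rw [List.eq_nil_iff_forall_not_mem]
      intro y hy
      have := (hdm y).1 hy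
      have := List.nodup_iff_count_le_one.1 hnd y
      omega
    rw [if_neg (show ¬(st.2.1 ≠ []) from fun h => h hdupnil)]
    have hmin := sorted_head_eq (x :: rest) hlne _ hmmem hmC
    have hmax := sorted_last_eq (x :: rest) hlne _ hMmem hMC
    rw [hmin, hmax]
    by_cases hm01 : st.2.2.1 = 0 ∨ st.2.2.1 = 1
    · rw [if_neg (not_not_intro hm01), if_neg (not_not_intro hm01)]
      have hkey := sorted_eq_range_iff (x :: rest) hnd _ _ hmC hMmem hMC
      have hlen : (st.1.length : Int) = ((x :: rest).length : Int) := by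
        rw [hseen, PySem.Set.ofList_eq_self_of_nodup _ hnd]
      by_cases hrange : PySem.List.sorted (x :: rest) id =
          PySem.List.pyRange (st.2.2.1) (st.2.2.2 + 1)
      · rw [if_neg (not_not_intro hrange),
          if_neg (not_not_intro (hlen.trans (hkey.1 hrange)))]
      · rw [if_pos hrange,
          if_pos (show (st.1.length : Int) ≠ st.2.2.2 - st.2.2.1 + 1 from
            fun h => hrange (hkey.2 (hlen.symm.trans h)))]
        refine congrArg (fun z => (false, some ("Phase sequence has gaps: missing phases " ++ pyIntListRepr z))) ?_
        -- missing phases: sorted set difference = in-order filter of the range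
        have hexpnd : (PySem.List.pyRange st.2.2.1 (st.2.2.2 + 1)).Nodup :=
          (pyRange_pairwise_lt _ _).imp (fun h => ne_of_lt h)
        have hsnd : (PySem.List.sorted (x :: rest) id).Nodup :=
          ((PySem.List.sorted_perm (x :: rest) id false).nodup_iff).2 hnd
        rw [PySem.Set.ofList_eq_self_of_nodup _ hexpnd,
          PySem.Set.ofList_eq_self_of_nodup _ hsnd]
        apply sorted_eq_target
        · exact (pyRange_pairwise_lt _ _).filter _
        · exact PySem.Set.nodup_diff _ _ hexpnd
        · intro y
          rw [PySem.Set.mem_diff, List.mem_filter]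
          have hcont : ∀ v : Int, st.1.contains v = decide (v ∈ x :: rest) := by
            intro v
            rw [PySem.Set.contains_eq_decide, hseen]
            simp [PySem.Set.mem_ofList]
          rw [hcont y]
          have hms : y ∈ PySem.List.sorted (x :: rest) id ↔ y ∈ x :: rest :=
            (PySem.List.sorted_perm (x :: rest) id false).mem_iff
          simp only [Bool.not_eq_true', decide_eq_false_iff_not]
          tauto
    · rw [if_pos hm01, if_pos hm01]
  · -- duplicates: A's first branch fires, B's dups set is nonempty
    rw [if_pos (show (x :: rest).length ≠ (PySem.Set.ofList (x :: rest)).length from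
      fun h => hnd ((lenOfList_eq_iff (x :: rest)).1 h.symm))]
    have hdupne : st.2.1 ≠ [] := by
      rw [ne_eq, List.eq_nil_iff_forall_not_mem]
      intro hall
      apply hnd
      rw [List.nodup_iff_count_le_one]
      intro y
      by_contra hy
      exact hall y ((hdm y).2 (by omega))
    rw [if_pos hdupne]
    exact congrArg (fun z => (false, some ("Phase sequence has duplicates: " ++ pyIntListRepr z)))
      (dup_sorted_eq (x :: rest) st.2.1 hdnd hdm)
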